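-- pv_equiv track=rewrite | github.com/hardy1109/ACC45DAYSOFCODE-2024 | Day 22 - DPOLY.py | find_polynomial_degree
-- ===== SOURCE A (Python) =====
-- def find_polynomial_degree(test_cases):
--     results = []
--     for case in test_cases:
--         N = case[0]
--         coefficients = case[1]
--
--         # Find the highest non-zero coefficient
--         degree = -1
--         for i in range(N-1, -1, -1):
--             if coefficients[i] != 0:
--                 degree = i
--                 break
--
--         results.append(degree)
--
--     return results
-- ===== SOURCE B (Python) =====
-- def find_polynomial_degree(test_cases):
--     results = []
--     for case in test_cases:
--         N = case[0]
--         coefficients = case[1]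
--         # forward scan: degree = largest index with a non-zero coefficient
--         degree = max((i for i in range(N) if coefficients[i] != 0), default=-1)
--         results.append(degree)
--     return results
-- ===== Notes on version B (the rewrite author's own statement) =====
-- stated objective: idiomatic
-- what changed: Per case, the backward early-exit scan is replaced by a forward max over all non-zero indices via a generator with default=-1.
-- outside the precondition, e.g. on find_polynomial_degree([(3, [1])]): A raises IndexError, B raises IndexError
import Mathlib
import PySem

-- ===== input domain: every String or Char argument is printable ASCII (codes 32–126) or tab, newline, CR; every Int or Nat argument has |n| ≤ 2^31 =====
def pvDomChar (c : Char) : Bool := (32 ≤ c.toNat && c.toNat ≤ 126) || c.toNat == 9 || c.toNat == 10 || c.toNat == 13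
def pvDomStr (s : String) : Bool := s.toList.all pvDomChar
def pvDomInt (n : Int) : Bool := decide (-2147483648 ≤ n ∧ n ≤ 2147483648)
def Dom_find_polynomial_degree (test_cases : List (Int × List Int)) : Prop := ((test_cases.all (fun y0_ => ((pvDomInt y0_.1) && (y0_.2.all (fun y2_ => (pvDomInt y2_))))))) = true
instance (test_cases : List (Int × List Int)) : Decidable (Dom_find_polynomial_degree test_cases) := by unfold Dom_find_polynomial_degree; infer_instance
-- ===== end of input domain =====

-- B replaces A's backward early-exit scan by a forward max over the non-zero indices (same cost, more idiomatic).

-- ===== PORT A =====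
-- inner loop 'for i in range(N-1,-1,-1): if coefficients[i] != 0: degree = i; break'
-- (coefficients[i] is total here via pyGetD; Pre_ excludes the inputs where Python raises IndexError)
def pvAInner (coeffs : List Int) : List Int → Int
  | [] => -1
  | i :: rest => if PySem.List.pyGetD coeffs i 0 ≠ 0 then i else pvAInner coeffs rest

def find_polynomial_degree (test_cases : List (Int × List Int)) : List Int :=
  test_cases.foldl
    (fun results case =>
      let N := case.1
      let coefficients := case.2
      let degree := pvAInner coefficients (PySem.List.pyRange (N - 1) (-1) (-1))
      results ++ [degree])
    []

-- ===== PORT B =====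
-- max((i for i in range(N) if coefficients[i] != 0), default=-1), per case
def find_polynomial_degree_alt (test_cases : List (Int × List Int)) : List Int :=
  test_cases.map
    (fun case =>
      (PySem.List.pyRange 0 case.1 1).foldl
        (fun m i => if PySem.List.pyGetD case.2 i 0 ≠ 0 then max m i else m) (-1))

-- ===== PRECONDITION & SPEC =====
-- Pre_ excludes exactly the inputs where Python A (and B alike) raises IndexError: some case with N > len(coefficients).
def Pre_find_polynomial_degree (test_cases : List (Int × List Int)) : Prop :=
  ∀ c ∈ test_cases, c.1 ≤ (c.2.length : Int)
instance (test_cases : List (Int × List Int)) : Decidable (Pre_find_polynomial_degree test_cases) := by unfold Pre_find_polynomial_degree; infer_instance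

def pvWitness_find_polynomial_degree : (List (Int × List Int)) := [(3, [0, 2, 0]), (0, []), (2, [0, 0])]

def Spec_find_polynomial_degree (test_cases : List (Int × List Int)) (out : List Int) : Prop := out = find_polynomial_degree_alt test_cases
instance (test_cases : List (Int × List Int)) (out : List Int) : Decidable (Spec_find_polynomial_degree test_cases out) := by unfold Spec_find_polynomial_degree; infer_instance

-- ===== CLAIM (what is proved, stated in full; the proofs are below) =====
def Claim_equal_find_polynomial_degree : Prop := ∀ (test_cases : List (Int × List Int)), Dom_find_polynomial_degree test_cases → Pre_find_polynomial_degree test_cases → Spec_find_polynomial_degree test_cases (find_polynomial_degree test_cases)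

-- ===== LEMMAS AND PROOFS =====

-- B's fold stays ≤ c when the seed and every element are ≤ c
theorem pvFoldl_le (coeffs : List Int) (c : Int) :
    ∀ (l : List Int) (a : Int), (∀ x ∈ l, x ≤ c) → a ≤ c →
      l.foldl (fun m i => if PySem.List.pyGetD coeffs i 0 ≠ 0 then max m i else m) a ≤ c := by
  intro l
  induction l with
  | nil => intro a _ ha; simpa using ha
  | cons x l ih =>
    intro a hl ha
    simp only [List.foldl_cons]
    apply ih
    · intro y hy; exact hl y (List.mem_cons_of_mem x hy)
    · split_ifs
      · exact max_le ha (hl x List.mem_cons_self)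
      · exact ha

-- first non-zero index from the top of a strictly increasing index list = max of the non-zero indices
theorem pvKey (coeffs : List Int) (l : List Int) (hp : l.Pairwise (· < ·))
    (h0 : ∀ x ∈ l, (-1 : Int) < x) :
    pvAInner coeffs l.reverse
      = l.foldl (fun m i => if PySem.List.pyGetD coeffs i 0 ≠ 0 then max m i else m) (-1) := by
  induction l using List.reverseRecOn with
  | nil => simp [pvAInner]
  | append_singleton l x ih =>
    have hp' : l.Pairwise (· < ·) := (List.pairwise_append.mp hp).1
    have hlt : ∀ y ∈ l, y < x := by
      intro y hy
      exact (List.pairwise_append.mp hp).2.2 y hy x (List.mem_singleton.mpr rfl)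
    have h0' : ∀ y ∈ l, (-1 : Int) < y := fun y hy => h0 y (List.mem_append_left _ hy)
    have hbound : l.foldl (fun m i => if PySem.List.pyGetD coeffs i 0 ≠ 0 then max m i else m) (-1) ≤ x := by
      apply pvFoldl_le
      · intro y hy; exact le_of_lt (hlt y hy)
      · exact le_of_lt (h0 x (List.mem_append_right _ (List.mem_singleton.mpr rfl)))
    rw [List.reverse_append]
    simp only [List.reverse_singleton, List.singleton_append, pvAInner, List.foldl_append,
      List.foldl_cons, List.foldl_nil]
    by_cases h : PySem.List.pyGetD coeffs x 0 ≠ 0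
    · rw [if_pos h, if_pos h]; exact (max_eq_right hbound).symm
    · rw [if_neg h, if_neg h]; exact ih hp' h0'

-- foldl-append accumulation is a map
theorem pvFoldl_append_map (g : (Int × List Int) → Int) :
    ∀ (tc : List (Int × List Int)) (acc : List Int),
      tc.foldl (fun r c => r ++ [g c]) acc = acc ++ tc.map g := by
  intro tc
  induction tc with
  | nil => intro acc; simp
  | cons c tc ih => intro acc; simp [List.foldl_cons, ih]

-- ===== VERDICT (by name: the statement is the Claim_ definition above) =====
theorem find_polynomial_degree_spec : Claim_equal_find_polynomial_degree := by
  intro tc _ _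
  unfold Spec_find_polynomial_degree find_polynomial_degree find_polynomial_degree_alt
  rw [pvFoldl_append_map
    (fun case => pvAInner case.2 (PySem.List.pyRange (case.1 - 1) (-1) (-1))) tc []]
  simp only [List.nil_append]
  apply List.map_congr_left
  intro c _
  have hrev : PySem.List.pyRange (c.1 - 1) (-1) (-1) = (PySem.List.pyRange 0 c.1 1).reverse := by
    have := PySem.List.pyRange_neg_one_eq_reverse (c.1 - 1) (-1)
    simpa using this
  rw [hrev]
  exact pvKey c.2 (PySem.List.pyRange 0 c.1 1) (PySem.List.pairwise_lt_pyRange_one 0 c.1)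
    (fun x hx => by have := (PySem.List.mem_pyRange_one.mp hx).1; omega)
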